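-- pv_equiv track=rewrite | github.com/wannabeyourfriend/THU-CST-DiscreteMath-2024-2025 | Lab-1/FunctionLab/recursion-PA2.py | vonNeumann
-- ===== SOURCE A (Python) =====
-- def vonNeumann(n):
--     if n == 0:
--         return "{}"
--     else:
--         result = []
--         for i in range(n):
--             result.append(vonNeumann(i))
--         return "{" + ", ".join(result) + "}"
-- ===== SOURCE B (Python) =====
-- def vonNeumann(n):
--     inner = ""
--     for k in range(n):
--         s = "{" + inner + "}"
--         inner = s if k == 0 else inner + ", " + s
--     return "{" + inner + "}"
-- ===== Notes on version B (the rewrite author's own statement) =====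
-- stated objective: faster
-- what changed: Replaced A's exponential nested recursion (vonNeumann(n) recomputes vonNeumann(i) for every i from scratch) by a single loop that maintains the already-joined string of all previous ordinals and derives each next ordinal from it, so the result is built in time linear in the output length.
import Mathlib
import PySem

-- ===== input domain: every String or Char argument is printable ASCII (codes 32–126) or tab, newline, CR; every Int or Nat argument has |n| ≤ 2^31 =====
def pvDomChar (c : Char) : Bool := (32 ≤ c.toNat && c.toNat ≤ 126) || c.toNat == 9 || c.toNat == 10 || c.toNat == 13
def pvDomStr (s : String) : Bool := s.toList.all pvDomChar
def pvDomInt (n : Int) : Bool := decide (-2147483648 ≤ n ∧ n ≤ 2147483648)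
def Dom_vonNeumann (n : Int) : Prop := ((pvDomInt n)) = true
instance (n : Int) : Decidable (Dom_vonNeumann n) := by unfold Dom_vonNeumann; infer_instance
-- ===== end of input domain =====

-- B replaces A's exponential recursion by one loop that reuses the previously
-- joined inner string, building the output in time linear in its length (objective: faster).

-- ===== PORT A =====
-- A: recursion; for n ≠ 0 collect vonNeumann(i) for i in range(n) and join with ", ".
def vonNeumann (n : Int) : String :=
  if n = 0 then "{}"
  else
    let result := (PySem.List.pyRange 0 n 1).attach.map (fun x => vonNeumann x.1)
    "{" ++ PySem.Str.join ", " result ++ "}"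
termination_by n.toNat
decreasing_by
  have h := PySem.List.mem_pyRange_one.mp x.2
  omega

-- ===== PORT B =====
-- B: one pass; `inner` is the ", "-joined list of all previous ordinal strings.
def vonNeumann_alt (n : Int) : String :=
  let inner := (PySem.List.pyRange 0 n 1).foldl (fun inner k =>
    let s := "{" ++ inner ++ "}"
    if k = 0 then s else inner ++ ", " ++ s) ""
  "{" ++ inner ++ "}"

-- ===== PRECONDITION & SPEC =====
def Spec_vonNeumann (n : Int) (out : String) : Prop := out = vonNeumann_alt n
instance (n : Int) (out : String) : Decidable (Spec_vonNeumann n out) := by unfold Spec_vonNeumann; infer_instance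

-- ===== CLAIM (what is proved, stated in full; the proofs are below) =====
def Claim_equal_vonNeumann : Prop := ∀ (n : Int), Dom_vonNeumann n → Spec_vonNeumann n (vonNeumann n)

-- ===== LEMMAS AND PROOFS =====

-- A's body with the `attach` removed
theorem vonNeumann_eq (n : Int) : vonNeumann n =
    if n = 0 then "{}"
    else "{" ++ PySem.Str.join ", " ((PySem.List.pyRange 0 n 1).map vonNeumann) ++ "}" := by
  rw [vonNeumann]
  simp [List.map_subtype]

theorem join_append_singleton (l : List String) (x : String) (h : l ≠ []) :
    PySem.Str.join ", " (l ++ [x]) = PySem.Str.join ", " l ++ ", " ++ x := by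
  induction l with
  | nil => exact absurd rfl h
  | cons a t ih =>
    cases t with
    | nil =>
      apply String.toList_injective
      simp [PySem.Str.toList_join, PySem.Chars.join_cons_cons, PySem.Chars.join_singleton]
    | cons b t' =>
      apply String.toList_injective
      have ih' := congrArg String.toList (ih (by simp))
      simp only [PySem.Str.toList_join, List.map_append, List.map_cons, List.cons_append,
        PySem.Chars.join_cons_cons, String.toList_append] at ih' ⊢
      rw [ih']
      simp

-- the loop invariant: after m iterations, `inner` is the join of vonNeumann 0 .. vonNeumann (m-1)
theorem fold_eq (m : Nat) :
    (PySem.List.pyRange 0 (m : Int) 1).foldl (fun inner k =>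
      let s := "{" ++ inner ++ "}"
      if k = 0 then s else inner ++ ", " ++ s) ""
      = PySem.Str.join ", " ((PySem.List.pyRange 0 (m : Int) 1).map vonNeumann) := by
  induction m with
  | zero => simp [PySem.List.pyRange_one_eq_nil, PySem.Str.join]
  | succ m ih =>
    have hsplit : PySem.List.pyRange 0 ((m : Int) + 1) 1
        = PySem.List.pyRange 0 (m : Int) 1 ++ [(m : Int)] :=
      PySem.List.pyRange_one_succ_right (by exact_mod_cast Nat.zero_le m)
    push_cast
    rw [hsplit, List.foldl_append, List.map_append, ih]
    cases m with
    | zero =>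
      simp [PySem.List.pyRange_one_eq_nil, PySem.Str.join, vonNeumann_eq]
    | succ j =>
      have hne : ((PySem.List.pyRange 0 ((j : Int) + 1) 1).map vonNeumann) ≠ [] := by
        rw [PySem.List.pyRange_one_cons (by omega)]
        simp
      have hm0 : ((j : Int) + 1) ≠ 0 := by omega
      push_cast at hne ⊢
      simp only [List.map_cons, List.map_nil, List.foldl_cons, List.foldl_nil, if_neg hm0]
      rw [join_append_singleton _ _ hne]
      rw [vonNeumann_eq, if_neg hm0]

-- ===== VERDICT (by name: the statement is the Claim_ definition above) =====
theorem vonNeumann_spec : Claim_equal_vonNeumann := by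
  intro n _
  unfold Spec_vonNeumann vonNeumann_alt
  by_cases hle : n ≤ 0
  · by_cases he : n = 0
    · rw [vonNeumann_eq, if_pos he, he]
      simp [PySem.List.pyRange_one_eq_nil]
    · rw [vonNeumann_eq, if_neg he]
      rw [PySem.List.pyRange_one_eq_nil (by omega)]
      simp [PySem.Str.join]
  · have hm : n = ((n.toNat : Nat) : Int) := by omega
    rw [hm, vonNeumann_eq, if_neg (by omega)]
    simp only [fold_eq]
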